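-- pv_equiv track=rewrite | github.com/robbiechia/curriculum-workforce-alignment | src/module_readiness/retrieval/text.py | build_overlap_terms
-- ===== SOURCE A (Python) =====
-- from typing import Iterable, List, Sequence
--
-- def build_overlap_terms(
--     query_tokens: Sequence[str],
--     doc_tokens: Sequence[str],
--     top_n: int = 6,
-- ) -> List[str]:
--     """Return the tokens that appear in both query and document, ranked by doc frequency.
--
--     Used to produce human-readable evidence strings on retrieved results —
--     the returned tokens explain *why* a job or module ranked highly for a given
--     query.  Tokens are ordered by how often they appear in the document (most
--     frequent first) so the most distinctive shared terms surface at the top.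
--     """
--     if not query_tokens or not doc_tokens:
--         return []
--
--     doc_counts = {}
--     for token in doc_tokens:
--         doc_counts[token] = doc_counts.get(token, 0) + 1
--
--     seen = set()
--     overlap = []
--     for token in query_tokens:
--         if token in seen:
--             continue
--         seen.add(token)
--         if token in doc_counts:
--             overlap.append((token, doc_counts[token]))
--
--     overlap.sort(key=lambda item: (-item[1], item[0]))
--     return [token for token, _ in overlap[:top_n]]
-- ===== SOURCE B (Python) =====
-- from typing import List, Sequence
--
--
-- def build_overlap_terms(
--     query_tokens: Sequence[str],
--     doc_tokens: Sequence[str],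
--     top_n: int = 6,
-- ) -> List[str]:
--     if not query_tokens or not doc_tokens:
--         return []
--     counts = {}
--     for t in doc_tokens:
--         counts[t] = counts.get(t, 0) + 1
--     # Pigeonhole by frequency: group the shared tokens into buckets keyed by
--     # their doc count, then emit buckets from the highest count down, each
--     # bucket alphabetically -- no comparison sort on composite (-count, token)
--     # keys and no seen-set.
--     buckets = {}
--     for t in set(query_tokens):
--         c = counts.get(t)
--         if c is not None:
--             buckets.setdefault(c, []).append(t)
--     result = []
--     for c in sorted(buckets, reverse=True):
--         result.extend(sorted(buckets[c]))
--     return result[:top_n]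
-- ===== Notes on version B (the rewrite author's own statement) =====
-- stated objective: alternative
-- what changed: B replaces A's seen-set dedup pass and comparison sort on (-count, token) pairs by a pigeonhole grouping: shared tokens are bucketed by their doc count in a dict, and the output is emitted by walking the count keys in descending sorted order, each bucket sorted alphabetically.
import Mathlib
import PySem

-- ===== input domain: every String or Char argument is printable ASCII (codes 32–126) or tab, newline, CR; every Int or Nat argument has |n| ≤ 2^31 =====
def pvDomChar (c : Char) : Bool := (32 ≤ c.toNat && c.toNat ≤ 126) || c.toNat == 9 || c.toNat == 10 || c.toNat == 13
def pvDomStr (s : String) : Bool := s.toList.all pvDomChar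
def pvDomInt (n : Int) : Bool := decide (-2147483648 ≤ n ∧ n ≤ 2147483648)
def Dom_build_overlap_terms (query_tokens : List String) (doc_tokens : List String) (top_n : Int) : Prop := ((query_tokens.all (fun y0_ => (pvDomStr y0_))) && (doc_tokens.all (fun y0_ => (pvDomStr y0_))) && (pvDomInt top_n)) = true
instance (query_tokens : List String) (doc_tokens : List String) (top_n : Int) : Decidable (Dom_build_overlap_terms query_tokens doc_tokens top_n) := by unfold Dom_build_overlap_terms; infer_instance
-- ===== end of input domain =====

-- B replaces A's seen-set dedup pass and comparison sort on (-count, token) pairs by a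
-- pigeonhole grouping into count-keyed buckets, emitted from the highest count down,
-- each bucket alphabetically: an alternative algorithm with the same exact results.


-- ===== PORT A =====
-- A: build a doc-frequency dict, collect (token, count) pairs for the deduped query
-- tokens present in the dict, sort by (-count, token), slice, project the tokens.
def build_overlap_terms (query_tokens : List String) (doc_tokens : List String) (top_n : Int) : List String :=
  if query_tokens = [] ∨ doc_tokens = [] then []
  else
    let doc_counts : PySem.Dict String Int :=
      doc_tokens.foldl (fun d t => d.insert t (d.getD t 0 + 1)) PySem.Dict.empty
    let st : PySem.Set String × List (String × Int) :=
      query_tokens.foldl (fun st token =>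
        if PySem.Set.contains st.1 token then st
        else
          if doc_counts.contains token then
            (PySem.Set.add st.1 token, st.2 ++ [(token, doc_counts.getD token 0)])
          else (PySem.Set.add st.1 token, st.2)) (PySem.Set.empty, [])
    let overlap := PySem.List.sorted2 st.2 (fun item => -item.2) (fun item => item.1)
    (PySem.List.slice overlap none (some top_n)).map (fun p => p.1)

-- ===== PORT B =====
-- B: counting dict; buckets = {count: [tokens]} over set(query_tokens) via
-- setdefault-append; walk sorted(buckets, reverse=True), each bucket sorted; slice.
def build_overlap_terms_alt (query_tokens : List String) (doc_tokens : List String) (top_n : Int) : List String :=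
  if query_tokens = [] ∨ doc_tokens = [] then []
  else
    let counts : PySem.Dict String Int :=
      doc_tokens.foldl (fun d t => d.insert t (d.getD t 0 + 1)) PySem.Dict.empty
    let buckets : PySem.Dict Int (List String) :=
      (PySem.Set.ofList query_tokens).foldl (fun b t =>
        match counts.get? t with
        | some c => b.modify c [] (fun l => l ++ [t])
        | none => b) PySem.Dict.empty
    let result : List String :=
      (PySem.List.sorted buckets.keys (fun c => c) true).foldl
        (fun acc c => acc ++ PySem.List.sorted (buckets.getD c []) (fun t => t)) []
    PySem.List.slice result none (some top_n)

-- ===== PRECONDITION & SPEC =====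
def Spec_build_overlap_terms (query_tokens : List String) (doc_tokens : List String) (top_n : Int) (out : List String) : Prop := out = build_overlap_terms_alt query_tokens doc_tokens top_n
instance (query_tokens : List String) (doc_tokens : List String) (top_n : Int) (out : List String) : Decidable (Spec_build_overlap_terms query_tokens doc_tokens top_n out) := by unfold Spec_build_overlap_terms; infer_instance

-- ===== CLAIM (what is proved, stated in full; the proofs are below) =====
def Claim_equal_build_overlap_terms : Prop := ∀ (query_tokens : List String) (doc_tokens : List String) (top_n : Int), Dom_build_overlap_terms query_tokens doc_tokens top_n → Spec_build_overlap_terms query_tokens doc_tokens top_n (build_overlap_terms query_tokens doc_tokens top_n)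

-- ===== LEMMAS AND PROOFS =====

-- the canonical form both ports are reduced to: the shared tokens (query order,
-- deduped), sorted by the lexicographic key (-doc count, token), then sliced
def pvCnt (doc_tokens : List String) (t : String) : Int := (doc_tokens.count t : Int)

def pvKey (doc_tokens : List String) (t : String) : Lex (Int × String) := toLex (-(pvCnt doc_tokens t), t)

def pvCommon (query_tokens doc_tokens : List String) : List String :=
  (PySem.Set.ofList query_tokens).filter (fun t => (PySem.Dict.counter doc_tokens).contains t)

-- ---------- A side ----------

-- slice commutes with map (clamping only reads the length)
theorem pv_slice_map {α β : Type} (g : α → β) (l : List α) (a? b? : Option Int) :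
    PySem.List.slice (l.map g) a? b? = (PySem.List.slice l a? b?).map g := by
  simp [PySem.List.slice, List.map_take, List.map_drop]

-- insertBy commutes with map when the comparison factors through g
theorem pv_insertBy_map {α β : Type} (g : α → β) (b : β → β → Bool) (x : α) (acc : List α) :
    PySem.List.insertBy b (g x) (acc.map g)
      = (PySem.List.insertBy (fun p q => b (g p) (g q)) x acc).map g := by
  induction acc with
  | nil => rfl
  | cons y ys ih =>
    simp only [List.map_cons, PySem.List.insertBy]
    by_cases h : b (g x) (g y) = true <;> simp [h, ih]

-- a fold of insertBy over mapped elements is the map of the fold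
theorem pv_foldl_insertBy_map {α β : Type} (g : α → β) (b : β → β → Bool) (l : List α) :
    ∀ (acc : List α),
      List.foldl (fun acc x => PySem.List.insertBy b (g x) acc) (acc.map g) l
        = (List.foldl (fun acc x => PySem.List.insertBy (fun p q => b (g p) (g q)) x acc) acc l).map g := by
  induction l with
  | nil => intro acc; rfl
  | cons x xs ih =>
    intro acc
    simp only [List.foldl_cons]
    rw [pv_insertBy_map]
    exact ih _

-- sorted2 commutes with map when both keys factor through g
theorem pv_sorted2_map {α β : Type} (g : α → β) (k1 : β → Int) (k2 : β → String) (l : List α) :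
    PySem.List.sorted2 (l.map g) k1 k2 false
      = (PySem.List.sorted2 l (fun a => k1 (g a)) (fun a => k2 (g a)) false).map g := by
  simp only [PySem.List.sorted2, Bool.false_eq_true, if_false]
  rw [List.foldl_map]
  exact pv_foldl_insertBy_map g _ l []

-- s is a prefix of Set.update s q
theorem pv_prefix_update {α : Type} [BEq α] (q : List α) (s : PySem.Set α) :
    s <+: PySem.Set.update s q := by
  induction q generalizing s with
  | nil => exact List.prefix_refl s
  | cons t q ih =>
    have h1 : s <+: PySem.Set.add s t := by
      unfold PySem.Set.add
      split
      · exact List.prefix_refl s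
      · exact List.prefix_append s [t]
    exact h1.trans (ih (PySem.Set.add s t))

-- A's query loop, fully characterised: the state after the loop
theorem pv_loopA (inD : String → Bool) (c : String → Int) (q : List String)
    (s : PySem.Set String) (ov : List (String × Int)) :
    q.foldl (fun st token =>
        if PySem.Set.contains st.1 token then st
        else
          if inD token then (PySem.Set.add st.1 token, st.2 ++ [(token, c token)])
          else (PySem.Set.add st.1 token, st.2)) (s, ov)
      = (PySem.Set.update s q,
         ov ++ (((PySem.Set.update s q).drop s.length).filter inD).map (fun t => (t, c t))) := by
  induction q generalizing s ov with
  | nil => simp [PySem.Set.update]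
  | cons t q ih =>
    simp only [List.foldl_cons]
    by_cases hmem : PySem.Set.contains s t = true
    · have hmem' : t ∈ s := (PySem.Set.contains_iff s t).mp hmem
      rw [if_pos hmem]
      have hupd : PySem.Set.update s (t :: q) = PySem.Set.update s q := by
        simp [PySem.Set.update, PySem.Set.add, hmem']
      rw [hupd]; exact ih s ov
    · have hmem' : t ∉ s := fun h => hmem ((PySem.Set.contains_iff s t).mpr h)
      rw [if_neg hmem]
      have hadd : PySem.Set.add s t = s ++ [t] := by simp [PySem.Set.add, hmem']
      have hupd : PySem.Set.update s (t :: q) = PySem.Set.update (s ++ [t]) q := by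
        simp [PySem.Set.update, hadd]
      obtain ⟨r, hr⟩ := pv_prefix_update q (s ++ [t])
      have hdrop1 : (PySem.Set.update (s ++ [t]) q).drop s.length = t :: r := by
        rw [← hr, List.append_assoc]; simp
      have hdrop2 : (PySem.Set.update (s ++ [t]) q).drop (s ++ [t]).length = r := by
        rw [← hr]; simp
      by_cases hd : inD t = true
      · rw [if_pos hd, hadd, ih (s ++ [t]) (ov ++ [(t, c t)]), hupd, hdrop1, hdrop2]
        simp [hd]
      · rw [if_neg hd, hadd, ih (s ++ [t]) ov, hupd, hdrop1, hdrop2]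
        simp [hd]

-- sorted2 with an Int first key and a String second key IS sorted with the lexicographic key
theorem pv_sorted2_eq_sorted {α : Type} (xs : List α) (k1 : α → Int) (k2 : α → String) :
    PySem.List.sorted2 xs k1 k2 = PySem.List.sorted xs (fun a => toLex (k1 a, k2 a)) := by
  rw [PySem.List.sorted_eq_foldl_insertBy]
  simp only [PySem.List.sorted2, Bool.false_eq_true, if_false]
  have hc : (fun a b => decide (k1 a < k1 b) || (!decide (k1 b < k1 a) && decide (k2 a < k2 b)))
      = (fun a b => decide ((toLex (k1 a, k2 a) : Lex (Int × String)) < toLex (k1 b, k2 b))) := by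
    funext a b
    by_cases h1 : k1 a < k1 b
    · simp [h1, Prod.Lex.lt_iff]
    · by_cases h2 : k1 b < k1 a
      · simp [h1, h2, Prod.Lex.lt_iff]
        intro he; omega
      · have he : k1 a = k1 b := le_antisymm (not_lt.1 h2) (not_lt.1 h1)
        simp [Prod.Lex.lt_iff, he]
  rw [hc]

-- A reduced to the canonical form
theorem pv_A_canon (q d : List String) (n : Int) (hguard : ¬ (q = [] ∨ d = [])) :
    build_overlap_terms q d n
      = PySem.List.slice (PySem.List.sorted (pvCommon q d) (pvKey d)) none (some n) := by
  unfold build_overlap_terms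
  rw [if_neg hguard]
  simp only [PySem.Dict.foldl_insert_getD_add_one_eq_counter]
  rw [pv_loopA (fun t => (PySem.Dict.counter d).contains t)
      (fun t => (PySem.Dict.counter d).getD t 0) q PySem.Set.empty []]
  have hdrop : ((PySem.Set.update (PySem.Set.empty : PySem.Set String) q).drop
      (PySem.Set.empty : PySem.Set String).length) = PySem.Set.ofList q := rfl
  rw [hdrop]
  simp only [List.nil_append]
  rw [pv_sorted2_map (fun t => (t, (PySem.Dict.counter d).getD t 0))
      (fun item => -item.2) (fun item => item.1)]
  rw [pv_slice_map]
  have hk : (fun t => -((PySem.Dict.counter d).getD t 0)) = fun t => -(pvCnt d t) := by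
    funext t; rw [PySem.Dict.getD_counter]; rfl
  rw [hk, pv_sorted2_eq_sorted]
  have hkey : (fun t => (toLex (-(pvCnt d t), t) : Lex (Int × String))) = pvKey d := rfl
  rw [hkey]
  simp [List.map_map, Function.comp_def, pvCommon]

-- ---------- B side ----------

-- the bucket loop, rewritten as a loop over the shared tokens with their counts
theorem pv_bucket_fold (d : List String) (l : List String) (b : PySem.Dict Int (List String)) :
    l.foldl (fun b t =>
        match (PySem.Dict.counter d).get? t with
        | some c => b.modify c [] (fun l => l ++ [t])
        | none => b) b
      = (l.filter (fun t => (PySem.Dict.counter d).contains t)).foldl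
          (fun b t => b.modify (pvCnt d t) [] (fun l => l ++ [t])) b := by
  induction l generalizing b with
  | nil => rfl
  | cons t l ih =>
    simp only [List.foldl_cons, List.filter_cons]
    cases hg : (PySem.Dict.counter d).get? t with
    | none =>
      have hc : (PySem.Dict.counter d).contains t = false :=
        (PySem.Dict.get?_eq_none_iff_contains _ t).mp hg
      simp only [hc, Bool.false_eq_true, if_false]
      exact ih b
    | some c =>
      have hc : (PySem.Dict.counter d).contains t = true := by
        rw [PySem.Dict.contains_eq_isSome_get?, hg]; rfl
      have hcv : c = pvCnt d t := by
        have h := PySem.Dict.getD_counter d t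
        rw [PySem.Dict.getD_eq_get?_getD, hg] at h
        simpa [pvCnt] using h
      simp only [hc, if_true, hcv]
      exact ih _

-- bucket contents: the shared tokens whose count is c, in query order
theorem pv_bucket_getD (d : List String) (l : List String) (c : Int) :
    ((l.foldl (fun b t => b.modify (pvCnt d t) [] (fun l => l ++ [t]))
        (PySem.Dict.empty : PySem.Dict Int (List String))).getD c [])
      = l.filter (fun t => pvCnt d t == c) := by
  have hfold : l.foldl (fun b t => b.modify (pvCnt d t) [] (fun l => l ++ [t]))
      (PySem.Dict.empty : PySem.Dict Int (List String))
      = (l.map (fun t => (pvCnt d t, t))).foldl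
          (fun b p => b.modify p.1 [] (fun l => l ++ [p.2]))
          (PySem.Dict.empty : PySem.Dict Int (List String)) := by
    rw [List.foldl_map]
  rw [hfold, PySem.Dict.getD_foldl_modify_append]
  simp [List.filter_map, Function.comp_def]

-- bucket keys: the distinct counts, in query order
theorem pv_bucket_keys (d : List String) (l : List String) :
    (l.foldl (fun b t => b.modify (pvCnt d t) [] (fun l => l ++ [t]))
        (PySem.Dict.empty : PySem.Dict Int (List String))).keys
      = PySem.Set.ofList (l.map (pvCnt d)) := by
  rw [PySem.Dict.keys_foldl_modify_key l (pvCnt d) [] (fun _ t => fun l => l ++ [t])]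
  rfl

-- a flatMap of per-key filters over distinct covering keys is a permutation of the list
theorem pv_flatMap_filter_perm {α κ : Type} [DecidableEq κ] (g : α → κ) :
    ∀ (ks : List κ) (l : List α), ks.Nodup → (∀ x ∈ l, g x ∈ ks) →
      (ks.flatMap (fun c => l.filter (fun x => g x == c))).Perm l := by
  intro ks
  induction ks with
  | nil =>
    intro l _ hcov
    cases l with
    | nil => simp
    | cons x l => exact absurd (hcov x List.mem_cons_self) (List.not_mem_nil)
  | cons c ks ih =>
    intro l hnd hcov
    simp only [List.flatMap_cons]
    have hrepl : ∀ c' ∈ ks, (l.filter (fun x => !(g x == c))).filter (fun x => g x == c')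
        = l.filter (fun x => g x == c') := by
      intro c' hc'
      rw [List.filter_filter]
      apply List.filter_congr
      intro x _
      by_cases h : g x = c'
      · have hne : c' ≠ c := fun he => (List.nodup_cons.mp hnd).1 (he ▸ hc')
        simp [h, hne]
      · simp [h]
    have hmap : ks.flatMap (fun c' => l.filter (fun x => g x == c'))
        = ks.flatMap (fun c' => (l.filter (fun x => !(g x == c))).filter (fun x => g x == c')) := by
      simp only [List.flatMap]
      congr 1
      exact (List.map_congr_left (fun c' hc' => (hrepl c' hc').symm))
    rw [hmap]
    have hcov' : ∀ x ∈ l.filter (fun x => !(g x == c)), g x ∈ ks := by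
      intro x hx
      obtain ⟨hxl, hxc⟩ := List.mem_filter.mp hx
      have hne : g x ≠ c := by simpa using hxc
      rcases List.mem_cons.mp (hcov x hxl) with h | h
      · exact absurd h hne
      · exact h
    have hperm := ih (l.filter (fun x => !(g x == c))) (List.nodup_cons.mp hnd).2 hcov'
    exact List.Perm.trans (hperm.append_left (l.filter (fun x => g x == c)))
      (List.filter_append_perm _ l)

-- pairwise across a flatMap: each block pairwise, blocks pairwise-related
theorem pv_pairwise_flatMap {α κ : Type} (f : κ → List α) (R : α → α → Prop) :
    ∀ (ks : List κ), (∀ c ∈ ks, (f c).Pairwise R) →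
      ks.Pairwise (fun c c' => ∀ x ∈ f c, ∀ y ∈ f c', R x y) →
      (ks.flatMap f).Pairwise R := by
  intro ks
  induction ks with
  | nil => intro _ _; simp
  | cons c ks ih =>
    intro h1 h2
    simp only [List.flatMap_cons]
    rw [List.pairwise_append]
    refine ⟨h1 c List.mem_cons_self,
      ih (fun c' hc' => h1 c' (List.mem_cons_of_mem _ hc')) (List.pairwise_cons.mp h2).2, ?_⟩
    intro x hx y hy
    obtain ⟨c', hc', hy'⟩ := List.mem_flatMap.mp hy
    exact (List.pairwise_cons.mp h2).1 c' hc' x hx y hy'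

-- a flatMap of blockwise permutations is a permutation of the flatMap
theorem pv_flatMap_perm_congr {α κ : Type} (f f' : κ → List α) :
    ∀ (ks : List κ), (∀ c ∈ ks, (f c).Perm (f' c)) → (ks.flatMap f).Perm (ks.flatMap f') := by
  intro ks
  induction ks with
  | nil => intro _; simp
  | cons c ks ih =>
    intro h
    simp only [List.flatMap_cons]
    exact (h c List.mem_cons_self).append (ih (fun c' hc' => h c' (List.mem_cons_of_mem _ hc')))

-- B reduced to the canonical form
theorem pv_B_canon (q d : List String) (n : Int) (hguard : ¬ (q = [] ∨ d = [])) :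
    build_overlap_terms_alt q d n
      = PySem.List.slice (PySem.List.sorted (pvCommon q d) (pvKey d)) none (some n) := by
  unfold build_overlap_terms_alt
  rw [if_neg hguard]
  simp only [PySem.Dict.foldl_insert_getD_add_one_eq_counter]
  rw [pv_bucket_fold]
  have hcom : (PySem.Set.ofList q).filter (fun t => (PySem.Dict.counter d).contains t)
      = pvCommon q d := rfl
  rw [hcom, pv_bucket_keys]
  have hL : (pvCommon q d).Nodup :=
    (PySem.Set.nodup_ofList q).filter _
  set L := pvCommon q d
  set ks := PySem.List.sorted (PySem.Set.ofList (L.map (pvCnt d))) (fun c => c) true with hks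
  have hgetD : (fun acc c => acc ++ PySem.List.sorted
        ((L.foldl (fun b t => b.modify (pvCnt d t) [] (fun l => l ++ [t]))
          (PySem.Dict.empty : PySem.Dict Int (List String))).getD c []) (fun t => t))
      = fun acc c => acc ++ PySem.List.sorted (L.filter (fun t => pvCnt d t == c)) (fun t => t) := by
    funext acc c
    rw [pv_bucket_getD]
  rw [hgetD, PySem.List.foldl_append_eq_flatMap]
  simp only [List.nil_append]
  -- name the emitted list and show it is exactly the canonical sort
  have hksnd : ks.Nodup :=
    ((PySem.List.sorted_perm _ _ _).nodup_iff).mpr (PySem.Set.nodup_ofList _)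
  have hmemks : ∀ x ∈ L, pvCnt d x ∈ ks := by
    intro x hx
    rw [hks, PySem.List.mem_sorted, PySem.Set.mem_ofList]
    exact List.mem_map_of_mem hx
  have hperm : (ks.flatMap (fun c => PySem.List.sorted
        (L.filter (fun t => pvCnt d t == c)) (fun t => t))).Perm L := by
    exact List.Perm.trans
      (pv_flatMap_perm_congr _ (fun c => L.filter (fun t => pvCnt d t == c)) ks
        (fun c _ => PySem.List.sorted_perm _ _ _))
      (pv_flatMap_filter_perm (pvCnt d) ks L hksnd hmemks)
  have hblockmem : ∀ (c : Int) (x : String),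
      x ∈ PySem.List.sorted (L.filter (fun t => pvCnt d t == c)) (fun t => t) →
      x ∈ L ∧ pvCnt d x = c := by
    intro c x hx
    rw [PySem.List.mem_sorted] at hx
    obtain ⟨h1, h2⟩ := List.mem_filter.mp hx
    exact ⟨h1, by simpa using h2⟩
  have hpw : (ks.flatMap (fun c => PySem.List.sorted
        (L.filter (fun t => pvCnt d t == c)) (fun t => t))).Pairwise
        (fun x y => pvKey d x < pvKey d y) := by
    apply pv_pairwise_flatMap
    · intro c _
      have hle := PySem.List.sorted_pairwise (L.filter (fun t => pvCnt d t == c)) (fun t => t)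
      have hnd : (PySem.List.sorted (L.filter (fun t => pvCnt d t == c)) (fun t => t)).Nodup :=
        ((PySem.List.sorted_perm _ _ _).nodup_iff).mpr (hL.filter _)
      have hlt := hle.and hnd
      refine hlt.imp_of_mem ?_
      intro x y hx hy hxy
      obtain ⟨_, hcx⟩ := hblockmem c x hx
      obtain ⟨_, hcy⟩ := hblockmem c y hy
      rw [pvKey, pvKey, hcx, hcy, Prod.Lex.lt_iff]
      exact Or.inr ⟨rfl, lt_of_le_of_ne hxy.1 hxy.2⟩
    · have hge := PySem.List.sorted_pairwise_rev (PySem.Set.ofList (L.map (pvCnt d))) (fun c => c)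
      have hgt := hge.and hksnd
      refine hgt.imp ?_
      intro c c' hcc x hx y hy
      obtain ⟨_, hcx⟩ := hblockmem c x hx
      obtain ⟨_, hcy⟩ := hblockmem c' y hy
      have hlt : c' < c := lt_of_le_of_ne hcc.1 (fun he => hcc.2 he.symm)
      rw [pvKey, pvKey, hcx, hcy, Prod.Lex.lt_iff]
      refine Or.inl ?_
      show (-c : Int) < -c'
      omega
  rw [PySem.List.sorted_eq_of_perm_of_pairwise_lt L _ (pvKey d) hperm hpw]

-- ===== VERDICT (by name: the statement is the Claim_ definition above) =====
theorem build_overlap_terms_spec : Claim_equal_build_overlap_terms := by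
  intro q d n _
  unfold Spec_build_overlap_terms
  by_cases hguard : q = [] ∨ d = []
  · unfold build_overlap_terms build_overlap_terms_alt
    simp [hguard]
  · rw [pv_A_canon q d n hguard, pv_B_canon q d n hguard]
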